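-- pv_equiv track=rewrite | github.com/FUUbi/PSSM | roc.py | calculateTrueNegative
-- ===== SOURCE A (Python) =====
-- def calculateTrueNegative(pco, negScores):
--     trueNegativeList = list()
--     poc = pco
--     negScores = negScores
--     value = 0
--     for i in range(len(pco)):
--         for x in range(len(negScores)):
--             if negScores[x] < poc[i]:
--                 value +=1
--         trueNegativeList.append(value)
--         value = 0
--     return trueNegativeList
-- ===== SOURCE B (Python) =====
-- def _bisect_left(s, t):
--     lo, hi = 0, len(s)
--     while lo < hi:
--         mid = (lo + hi) // 2
--         if s[mid] < t:
--             lo = mid + 1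
--         else:
--             hi = mid
--     return lo
--
--
-- def calculateTrueNegative(pco, negScores):
--     s = sorted(negScores)
--     return [_bisect_left(s, t) for t in pco]
-- ===== Notes on version B (the rewrite author's own statement) =====
-- stated objective: faster
-- what changed: Replaced the nested O(n*m) scan (for each threshold, rescan all negScores) by sorting negScores once and answering each threshold with a hand-written bisect_left binary search.
import Mathlib
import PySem

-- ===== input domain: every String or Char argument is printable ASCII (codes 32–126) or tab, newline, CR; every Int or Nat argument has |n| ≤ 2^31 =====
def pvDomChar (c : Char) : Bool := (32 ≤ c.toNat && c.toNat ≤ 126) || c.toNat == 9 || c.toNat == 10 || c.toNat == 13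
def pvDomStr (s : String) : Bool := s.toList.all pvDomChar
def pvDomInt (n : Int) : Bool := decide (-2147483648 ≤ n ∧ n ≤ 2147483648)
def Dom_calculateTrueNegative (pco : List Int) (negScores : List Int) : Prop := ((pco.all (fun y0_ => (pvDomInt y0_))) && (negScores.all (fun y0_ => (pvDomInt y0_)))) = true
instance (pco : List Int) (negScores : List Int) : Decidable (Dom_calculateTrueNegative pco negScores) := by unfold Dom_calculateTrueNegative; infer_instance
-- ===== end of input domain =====

-- B replaces A's quadratic nested scan by sort-once + binary search per threshold (asymptotically faster).

-- ===== PORT A =====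
-- literal transliteration of A: outer loop over indices of pco, inner loop counting
-- negScores[x] < pco[i], appending the count and resetting it each iteration.
def calculateTrueNegative (pco : List Int) (negScores : List Int) : List Int :=
  (PySem.List.pyRange 0 pco.length).foldl (fun trueNegativeList i =>
    let value : Int := (PySem.List.pyRange 0 negScores.length).foldl (fun value x =>
      if PySem.List.pyGetD negScores x 0 < PySem.List.pyGetD pco i 0 then value + 1 else value) 0
    trueNegativeList ++ [value]) []

-- ===== PORT B =====
-- Source B: s = sorted(negScores); one hand-written bisect_left per threshold
-- (PySem.List.bisectLeft is exactly that lo/hi binary-search loop).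
def calculateTrueNegative_alt (pco : List Int) (negScores : List Int) : List Int :=
  let s := PySem.List.sorted negScores (fun y => y)
  pco.map (fun t => ((PySem.List.bisectLeft s t : Nat) : Int))

-- ===== PRECONDITION & SPEC =====
def Spec_calculateTrueNegative (pco : List Int) (negScores : List Int) (out : List Int) : Prop := out = calculateTrueNegative_alt pco negScores
instance (pco : List Int) (negScores : List Int) (out : List Int) : Decidable (Spec_calculateTrueNegative pco negScores out) := by unfold Spec_calculateTrueNegative; infer_instance

-- ===== CLAIM (what is proved, stated in full; the proofs are below) =====
def Claim_equal_calculateTrueNegative : Prop := ∀ (pco : List Int) (negScores : List Int), Dom_calculateTrueNegative pco negScores → Spec_calculateTrueNegative pco negScores (calculateTrueNegative pco negScores)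

-- ===== LEMMAS AND PROOFS =====

-- A's inner loop over indices counts the negScores elements below the threshold T.
theorem inner_count (ns : List Int) (T : Int) :
    (PySem.List.pyRange 0 ns.length).foldl
        (fun v x => if PySem.List.pyGetD ns x 0 < T then v + 1 else v) (0:Int)
      = (ns.countP (fun y => decide (y < T)) : Int) := by
  have h1 := PySem.List.foldl_count_if (fun x => decide (PySem.List.pyGetD ns x 0 < T))
    (PySem.List.pyRange 0 ns.length) 0
  simp only [decide_eq_true_eq, zero_add] at h1
  rw [h1]
  congr 1
  conv_rhs => rw [← PySem.List.map_pyGetD_pyRange_zero ns 0]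
  rw [List.countP_map]
  rfl

-- A computes, for each threshold t in pco, the count of negScores elements below t.
theorem calcA_eq_map_countP (pco negScores : List Int) :
    calculateTrueNegative pco negScores
      = pco.map (fun t => ((negScores.countP (fun y => decide (y < t)) : Nat) : Int)) := by
  unfold calculateTrueNegative
  simp only [inner_count]
  rw [PySem.List.foldl_append_singleton_eq_map, List.nil_append]
  conv_rhs => rw [← PySem.List.map_pyGetD_pyRange_zero pco 0]
  rw [List.map_map]
  rfl

-- On a ≤-sorted list, bisect_left lands exactly after the elements below t.
theorem bisectLeft_eq_countP (s : List Int) (t : Int)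
    (hs : List.Pairwise (fun a b => a ≤ b) s) :
    PySem.List.bisectLeft s t = s.countP (fun y => decide (y < t)) := by
  obtain ⟨hk, hlt, hge⟩ := PySem.List.bisectLeft_spec s t hs
  set k := PySem.List.bisectLeft s t with hkdef
  have hsplit : s = s.take k ++ s.drop k := (List.take_append_drop k s).symm
  rw [hsplit, List.countP_append]
  have h1 : (s.take k).countP (fun y => decide (y < t)) = (s.take k).length := by
    rw [List.countP_eq_length]
    intro a ha
    obtain ⟨j, hj, rfl⟩ := List.getElem_of_mem ha
    have hjlen : j < s.length := lt_of_lt_of_le (lt_of_lt_of_le hj (by simp [List.length_take])) le_rfl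
    rw [List.getElem_take]
    have hjk : j < k := lt_of_lt_of_le hj (by simp [List.length_take])
    simpa using hlt j hjlen hjk
  have h2 : (s.drop k).countP (fun y => decide (y < t)) = 0 := by
    rw [List.countP_eq_zero]
    intro a ha
    obtain ⟨j, hj, rfl⟩ := List.getElem_of_mem ha
    rw [List.getElem_drop]
    have hjlen : k + j < s.length := by
      have := hj; simp [List.length_drop] at this; omega
    have := hge (k + j) hjlen (Nat.le_add_right _ _)
    simp; omega
  rw [h1, h2, List.length_take]
  omega

-- ===== VERDICT (by name: the statement is the Claim_ definition above) =====
theorem calculateTrueNegative_spec : Claim_equal_calculateTrueNegative := by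
  intro pco negScores _
  unfold Spec_calculateTrueNegative calculateTrueNegative_alt
  rw [calcA_eq_map_countP]
  apply List.map_congr_left
  intro t _
  have hperm := PySem.List.sorted_perm negScores (fun y => y) false
  rw [bisectLeft_eq_countP _ t (by simpa using PySem.List.sorted_pairwise negScores (fun y => y)),
    hperm.countP_eq]
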